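-- pv_equiv track=rewrite | github.com/XanderDhondtUCLL/course-material | exercises/strings/student.py | is_student_id
-- ===== SOURCE A (Python) =====
-- def is_student_id(string):
--     if len(string) != 8:
--         return False
--
--     if string[0] not in 'RSrs':
--         return False
--
--     for i in range(1, len(string)):
--         if string[i] not in '0123456789':
--             return False
--
--     return True
-- ===== SOURCE B (Python) =====
-- import re
--
-- _STUDENT_ID_RE = re.compile(r'[RSrs][0-9]{7}')
--
-- def is_student_id(string):
--     return _STUDENT_ID_RE.fullmatch(string) is not None
-- ===== Notes on version B (the rewrite author's own statement) =====
-- stated objective: idiomatic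
-- what changed: Replaced the explicit length check, first-character check and index loop with a single precompiled anchored regular-expression fullmatch of [RSrs][0-9]{7}.
import Mathlib
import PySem

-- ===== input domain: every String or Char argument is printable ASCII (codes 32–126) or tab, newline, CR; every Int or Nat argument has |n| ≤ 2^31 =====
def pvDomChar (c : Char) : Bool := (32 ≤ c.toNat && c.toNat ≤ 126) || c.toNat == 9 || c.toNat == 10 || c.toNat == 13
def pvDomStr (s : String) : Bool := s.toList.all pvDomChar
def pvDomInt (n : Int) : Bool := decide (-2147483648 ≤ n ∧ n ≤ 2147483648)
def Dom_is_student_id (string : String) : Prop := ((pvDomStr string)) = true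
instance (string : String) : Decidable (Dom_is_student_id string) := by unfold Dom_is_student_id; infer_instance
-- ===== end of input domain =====

-- B replaces A's explicit length/first-char/index-loop checks with one anchored regex fullmatch; same return value, idiomatic.

-- ===== PORT A =====
def is_student_id (string : String) : Bool :=
  if PySem.Str.len string ≠ 8 then false
  else if !("RSrs".toList.contains ((PySem.Str.pyGet? string 0).getD ' ')) then false
  else (PySem.List.pyRange 1 (PySem.Str.len string) 1).all (fun i =>
    "0123456789".toList.contains ((PySem.Str.pyGet? string i).getD ' '))

-- ===== PORT B =====
-- regex fullmatch of [RSrs][0-9]{7}: first char in the class, then exactly 7 chars in [0-9]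
def is_student_id_alt (string : String) : Bool :=
  match string.toList with
  | [] => false
  | c :: rest =>
    "RSrs".toList.contains c && rest.length == 7 &&
      rest.all (fun d => "0123456789".toList.contains d)

-- ===== PRECONDITION & SPEC =====
def Spec_is_student_id (string : String) (out : Bool) : Prop := out = is_student_id_alt string
instance (string : String) (out : Bool) : Decidable (Spec_is_student_id string out) := by unfold Spec_is_student_id; infer_instance

-- ===== CLAIM (what is proved, stated in full; the proofs are below) =====
def Claim_equal_is_student_id : Prop := ∀ (string : String), Dom_is_student_id string → Spec_is_student_id string (is_student_id string)

-- ===== LEMMAS AND PROOFS =====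

theorem main_list (L : List Char) :
    (if (L.length : Int) ≠ 8 then false
     else if !("RSrs".toList.contains ((PySem.List.pyGet? L 0).getD ' ')) then false
     else (PySem.List.pyRange 1 (L.length : Int) 1).all (fun i =>
       "0123456789".toList.contains (((PySem.List.pyGet? L i)).getD ' '))) =
    (match L with
     | [] => false
     | c :: rest =>
       "RSrs".toList.contains c && rest.length == 7 &&
         rest.all (fun d => "0123456789".toList.contains d)) := by
  by_cases h : L.length = 8
  · match L, h with
    | [a,b,c,d,e,f,g,k], _ =>
      have hr : PySem.List.pyRange (1:Int) (8:Int) 1 = [1,2,3,4,5,6,7] := by decide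
      simp [hr, PySem.List.pyGet?, PySem.List.pyIdx?]
  · cases L with
    | nil => simp
    | cons c rest =>
      have h7 : rest.length ≠ 7 := by simp at h; omega
      have h8 : ((rest.length : Int) + 1 ≠ 8) := by omega
      simp [h7, h8]

-- ===== VERDICT (by name: the statement is the Claim_ definition above) =====
theorem is_student_id_spec : Claim_equal_is_student_id := by
  intro s _
  unfold Spec_is_student_id is_student_id is_student_id_alt
  have := main_list s.toList
  simpa [PySem.Str.len, PySem.Str.pyGet?, PySem.Chars.len] using this
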